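-- pv_equiv track=rewrite | github.com/SunJaycy/sk83.LevelCompiler | BlenderScripts/Skate3MappingTools/Collision_Export_Dumbad_Tuukkas.py | _build_vertex_triangle_map
-- ===== SOURCE A (Python) =====
-- from typing import List, Tuple, Dict
--
-- def _build_vertex_triangle_map(tris: List[Tuple[int, int, int]]) -> Dict[int, List[int]]:
--     """Build mapping from vertex index to list of triangle indices
--
--     Port of RenderWare VertexTriangleMap (rwcclusteredmeshbuildermethods.cpp lines 566-619)
--     Returns: Dict[vertex_id] = [list_of_triangle_ids]
--     """
--     vertex_tri_map = {}
--     for tri_id, (a, b, c) in enumerate(tris):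
--         for v in (a, b, c):
--             if v not in vertex_tri_map:
--                 vertex_tri_map[v] = []
--             vertex_tri_map[v].append(tri_id)
--     return vertex_tri_map
-- ===== SOURCE B (Python) =====
-- from typing import List, Tuple, Dict
--
-- def _build_vertex_triangle_map(tris: List[Tuple[int, int, int]]) -> Dict[int, List[int]]:
--     """Flatten triangles into (vertex, tri_id) pairs, then gather per key."""
--     pairs = [(v, t) for t, tri in enumerate(tris) for v in tri]
--     return {v: [t for u, t in pairs if u == v]
--             for v in dict.fromkeys(u for u, _ in pairs)}
-- ===== Notes on version B (the rewrite author's own statement) =====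
-- stated objective: alternative
-- what changed: A scatters tri_ids into a dict in one pass with explicit key initialisation; B flattens the triangles into (vertex, tri_id) pairs once and then builds the result by gathering, for each first-occurrence-deduplicated vertex, the tri_ids from the pair list with a filter.
import Mathlib
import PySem

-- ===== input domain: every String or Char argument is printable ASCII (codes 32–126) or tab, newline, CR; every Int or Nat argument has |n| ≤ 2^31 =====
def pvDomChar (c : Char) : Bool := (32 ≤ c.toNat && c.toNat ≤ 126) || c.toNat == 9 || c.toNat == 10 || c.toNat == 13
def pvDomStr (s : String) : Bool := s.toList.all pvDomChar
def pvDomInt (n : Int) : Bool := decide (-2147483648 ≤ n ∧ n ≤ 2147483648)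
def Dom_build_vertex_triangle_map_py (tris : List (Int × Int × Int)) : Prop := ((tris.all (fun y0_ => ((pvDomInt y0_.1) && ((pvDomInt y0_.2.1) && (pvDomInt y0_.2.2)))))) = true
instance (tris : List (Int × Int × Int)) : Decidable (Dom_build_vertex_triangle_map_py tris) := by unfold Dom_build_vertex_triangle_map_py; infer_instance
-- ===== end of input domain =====

-- B replaces A's one-pass dict scatter by flatten-to-pairs then a per-key gather (alternative decomposition, not faster).

-- ===== PORT A =====
-- `if v not in map: map[v] = []` then `map[v].append(tri_id)`
def pvStepA (d : PySem.Dict Int (List Int)) (t : Int) (v : Int) : PySem.Dict Int (List Int) :=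
  let d' := if d.contains v then d else d.insert v ([] : List Int)
  d'.modify v [] (fun l => l ++ [t])

def build_vertex_triangle_map_py (tris : List (Int × Int × Int)) : List (Int × List Int) :=
  ((PySem.List.enumerate tris).foldl
    (fun d p => [p.2.1, p.2.2.1, p.2.2.2].foldl (fun d v => pvStepA d p.1 v) d)
    PySem.Dict.empty).items

-- ===== PORT B =====
def build_vertex_triangle_map_py_alt (tris : List (Int × Int × Int)) : List (Int × List Int) :=
  let pairs := (PySem.List.enumerate tris).flatMap
    (fun p => [(p.2.1, p.1), (p.2.2.1, p.1), (p.2.2.2, p.1)])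
  (PySem.List.dedup (pairs.map (·.1))).map
    (fun v => (v, (pairs.filter (fun q => q.1 == v)).map (·.2)))

-- ===== PRECONDITION & SPEC =====
def Spec_build_vertex_triangle_map_py (tris : List (Int × Int × Int)) (out : List (Int × List Int)) : Prop := out = build_vertex_triangle_map_py_alt tris
instance (tris : List (Int × Int × Int)) (out : List (Int × List Int)) : Decidable (Spec_build_vertex_triangle_map_py tris out) := by unfold Spec_build_vertex_triangle_map_py; infer_instance

-- ===== CLAIM (what is proved, stated in full; the proofs are below) =====
def Claim_equal_build_vertex_triangle_map_py : Prop := ∀ (tris : List (Int × Int × Int)), Dom_build_vertex_triangle_map_py tris → Spec_build_vertex_triangle_map_py tris (build_vertex_triangle_map_py tris)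

-- ===== LEMMAS AND PROOFS =====

-- A's "if absent then init to []; then append" is one `modify`.
theorem pvStepA_eq_modify (d : PySem.Dict Int (List Int)) (t v : Int) :
    pvStepA d t v = d.modify v [] (fun l => l ++ [t]) := by
  unfold pvStepA
  by_cases h : d.contains v = true
  · simp [h]
  · simp only [h, Bool.false_eq_true, reduceIte]
    show (d.insert v []).insert v ((d.insert v ([] : List Int)).getD v [] ++ [t])
        = d.insert v (d.getD v [] ++ [t])
    rw [PySem.Dict.insert_insert_self, PySem.Dict.getD_insert_self,
      PySem.Dict.getD_of_not_contains (d := d) (k := v) (d0 := []) (Bool.not_eq_true _ |>.mp h)]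

-- A's nested loop is the flat pair loop.
theorem pvLoopA_eq_flat (tris : List (Int × Int × Int)) (s : Int) (d : PySem.Dict Int (List Int)) :
    (PySem.List.enumerate tris s).foldl
      (fun d p => pvStepA (pvStepA (pvStepA d p.1 p.2.1) p.1 p.2.2.1) p.1 p.2.2.2) d
    = ((PySem.List.enumerate tris s).flatMap
        (fun p => [(p.2.1, p.1), (p.2.2.1, p.1), (p.2.2.2, p.1)])).foldl
        (fun d q => d.modify q.1 [] (fun l => l ++ [q.2])) d := by
  induction tris generalizing s d with
  | nil => simp [PySem.List.enumerate_nil]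
  | cons x xs ih =>
    simp only [PySem.List.enumerate_cons, List.flatMap_cons, List.foldl_cons, List.foldl_append,
      List.foldl_nil]
    rw [ih, pvStepA_eq_modify, pvStepA_eq_modify, pvStepA_eq_modify]

-- ===== VERDICT (by name: the statement is the Claim_ definition above) =====
theorem build_vertex_triangle_map_py_spec : Claim_equal_build_vertex_triangle_map_py := by
  intro tris _
  unfold Spec_build_vertex_triangle_map_py build_vertex_triangle_map_py build_vertex_triangle_map_py_alt
  simp only [List.foldl_cons, List.foldl_nil]
  rw [pvLoopA_eq_flat]
  set pairs := (PySem.List.enumerate tris).flatMap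
    (fun p => [(p.2.1, p.1), (p.2.2.1, p.1), (p.2.2.2, p.1)]) with hpairs
  have hnd : (pairs.foldl (fun d q => d.modify q.1 [] (fun l => l ++ [q.2]))
      PySem.Dict.empty).keys.Nodup := by
    exact PySem.Dict.nodup_keys_foldl_modify_key pairs (·.1) [] _ _ (by simp)
  rw [PySem.Dict.items_eq_map_keys _ hnd ([] : List Int)]
  rw [PySem.Dict.keys_foldl_modify_key]
  simp only [PySem.Dict.getD_foldl_modify_append, PySem.Dict.getD_empty, List.nil_append]
  simp [PySem.Set.update_nil_left, PySem.List.dedup_eq_ofList, PySem.Dict.keys_empty]
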